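-- pv_equiv track=rewrite | github.com/vamsi-panchada/VAVE_DSA | leetcode/easy/python/WC_499_1.py | minDeletion
-- ===== SOURCE A (Python) =====
-- from collections import defaultdict
-- import heapq
--
-- def minDeletion(s: str, k: int) -> int:
--     counter = defaultdict(int)
--     for i in s:
--         counter[i] += 1
--     if len(counter)<=k:
--         return 0
--     smallest = heapq.nsmallest(len(counter) - k, counter.values())
--     return sum(smallest)
-- ===== SOURCE B (Python) =====
-- def minDeletion(s: str, k: int) -> int:
--     freq = {}
--     for ch in s:
--         freq[ch] = freq.get(ch, 0) + 1
--     need = len(freq) - k      # how many distinct characters must be deleted entirely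
--     if need <= 0:
--         return 0
--     # counting-sort selection: bucket the counts by value (1..len(s)), no heap/sort
--     buckets = [0] * (len(s) + 1)
--     for f in freq.values():
--         buckets[f] += 1
--     ans = 0
--     for f in range(1, len(s) + 1):
--         take = min(buckets[f], need)
--         ans += take * f
--         need -= take
--         if need == 0:
--             break
--     return ans
-- ===== Notes on version B (the rewrite author's own statement) =====
-- stated objective: alternative
-- what changed: B replaces A's heap selection of the (distinct-k) smallest counts with a counting-sort selection: it buckets the counts into a frequency-of-frequency array of size len(s)+1 and scans bucket values 1..len(s) ascending, taking counts greedily until the deletion quota (distinct-k) is filled; no heap or comparison sort is used.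
import Mathlib
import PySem

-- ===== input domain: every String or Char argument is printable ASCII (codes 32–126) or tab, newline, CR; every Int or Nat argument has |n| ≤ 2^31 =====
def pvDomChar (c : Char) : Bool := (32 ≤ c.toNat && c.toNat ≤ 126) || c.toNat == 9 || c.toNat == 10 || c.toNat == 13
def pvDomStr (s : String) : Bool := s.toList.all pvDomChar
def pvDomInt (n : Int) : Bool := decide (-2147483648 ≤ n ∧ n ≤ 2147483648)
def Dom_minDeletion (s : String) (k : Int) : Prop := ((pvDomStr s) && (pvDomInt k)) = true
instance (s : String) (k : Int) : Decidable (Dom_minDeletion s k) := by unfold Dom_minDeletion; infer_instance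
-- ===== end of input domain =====

-- B replaces A's heap selection of the (distinct-k) smallest counts with a counting-sort bucket scan over count values; objective: alternative.

-- ===== PORT A =====
def minDeletion (s : String) (k : Int) : Int :=
  let counter := s.toList.foldl (fun d c => d.modify c 0 (· + 1)) (PySem.Dict.empty : PySem.Dict Char Int)
  if (counter.size : Int) ≤ k then 0
  else
    -- heapq.nsmallest(n, vals) = sorted(vals)[:n]
    let smallest := (PySem.List.sorted counter.values (fun x => x) false).take ((counter.size : Int) - k).toNat
    smallest.sum

-- ===== PORT B =====
-- the scan 'for f in range(1, len(s)+1): … if need == 0: break'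
def pvScan (buckets : List Int) : List Int → Int → Int → Int
  | [], ans, _ => ans
  | f :: fs, ans, need =>
    let take := min (PySem.List.pyGetD buckets f 0) need   -- buckets[f]; f ∈ [1, len(s)] is always in range
    let ans' := ans + take * f
    let need' := need - take
    if need' = 0 then ans' else pvScan buckets fs ans' need'

def minDeletion_alt (s : String) (k : Int) : Int :=
  let freq := s.toList.foldl (fun d c => d.insert c (d.getD c 0 + 1)) (PySem.Dict.empty : PySem.Dict Char Int)
  let need := (freq.size : Int) - k
  if need ≤ 0 then 0
  else
    -- buckets[f] += 1 over freq.values; f is a count of a character of s, so 1 ≤ f ≤ len(s) and the index is always in range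
    let buckets := freq.values.foldl (fun b f => b.set f.toNat (PySem.List.pyGetD b f 0 + 1))
                     (List.replicate (s.toList.length + 1) (0 : Int))
    pvScan buckets (PySem.List.pyRange 1 (s.toList.length + 1) 1) 0 need

-- ===== PRECONDITION & SPEC =====
def Spec_minDeletion (s : String) (k : Int) (out : Int) : Prop := out = minDeletion_alt s k
instance (s : String) (k : Int) (out : Int) : Decidable (Spec_minDeletion s k out) := by unfold Spec_minDeletion; infer_instance

-- ===== CLAIM (what is proved, stated in full; the proofs are below) =====
def Claim_equal_minDeletion : Prop := ∀ (s : String) (k : Int), Dom_minDeletion s k → Spec_minDeletion s k (minDeletion s k)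

-- ===== LEMMAS AND PROOFS =====

-- the bucket-building fold adds the multiplicity of each in-range value to its slot
theorem pvBucket_getD (vs : List Int) : ∀ (b : List Int),
    (∀ v ∈ vs, 0 ≤ v ∧ v < (b.length : Int)) → ∀ (j : Int), 0 ≤ j → j < (b.length : Int) →
    PySem.List.pyGetD (vs.foldl (fun b f => b.set f.toNat (PySem.List.pyGetD b f 0 + 1)) b) j 0
      = PySem.List.pyGetD b j 0 + (vs.count j : Int) := by
  induction vs with
  | nil => intro b _ j _ _; simp
  | cons v vs ih =>
    intro b hv j hj0 hj
    have hvb := hv v (List.mem_cons_self)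
    have hlen : (b.set v.toNat (PySem.List.pyGetD b v 0 + 1)).length = b.length := by simp
    rw [List.foldl_cons, ih _ (fun x hx => by rw [hlen]; exact hv x (List.mem_cons_of_mem _ hx)) j hj0 (by rw [hlen]; exact hj)]
    rw [PySem.List.pyGetD_eq_getElem _ _ hj0 (by simpa [hlen] using hj),
        PySem.List.pyGetD_eq_getElem _ _ hj0 (by simpa using hj)]
    rw [List.getElem_set]
    by_cases hjv : j = v
    · subst hjv
      simp only [if_true, List.count_cons_self,
        PySem.List.pyGetD_eq_getElem b (0:Int) hj0 (by simpa using hj)]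
      push_cast; ring
    · rw [if_neg (by omega)]
      rw [List.count_cons_of_ne (by exact fun h => hjv (by omega))]

-- a sorted list whose elements all dominate f splits as (all the f's) ++ (the rest)
theorem pvSplit (f : Int) (L : List Int) (hs : L.Pairwise (· ≤ ·)) (hge : ∀ x ∈ L, f ≤ x) :
    ∃ L', L = List.replicate (L.count f) f ++ L' ∧ f ∉ L' ∧ L'.Pairwise (· ≤ ·) ∧ (∀ x ∈ L', x ∈ L) := by
  induction L with
  | nil => exact ⟨[], by simp⟩
  | cons x t ih =>
    rcases List.pairwise_cons.1 hs with ⟨hxle, hst⟩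
    by_cases hxf : x = f
    · subst hxf
      obtain ⟨L', h1, h2, h3, h4⟩ := ih hst (fun y hy => hge y (List.mem_cons_of_mem _ hy))
      refine ⟨L', ?_, h2, h3, fun y hy => List.mem_cons_of_mem _ (h4 y hy)⟩
      rw [List.count_cons_self, List.replicate_succ, List.cons_append]
      exact congrArg _ h1
    · have hfx : f < x := lt_of_le_of_ne (hge x List.mem_cons_self) (fun h => hxf h.symm)
      have hnot : f ∉ x :: t := by
        intro hmem
        rcases List.mem_cons.1 hmem with h | h
        · omega
        · exact absurd (hxle f h) (by omega)
      refine ⟨x :: t, ?_, hnot, hs, fun y hy => hy⟩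
      simp [List.count_eq_zero_of_not_mem hnot]

-- the ascending bucket scan with quota 'need' sums the 'need' smallest elements of L
theorem pvScan_spec (fs : List Int) : ∀ (L buckets : List Int) (ans need : Int),
    0 < need → L.Pairwise (· ≤ ·) → fs.Pairwise (· < ·) → (∀ x ∈ L, x ∈ fs) →
    (∀ f ∈ fs, PySem.List.pyGetD buckets f 0 = (L.count f : Int)) →
    pvScan buckets fs ans need = ans + (L.take need.toNat).sum := by
  induction fs with
  | nil =>
    intro L buckets ans need _ _ _ hmem _
    have : L = [] := List.eq_nil_iff_forall_not_mem.2 (fun x hx => List.not_mem_nil (hmem x hx))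
    subst this
    simp [pvScan]
  | cons f fs ih =>
    intro L buckets ans need hneed hsL hsfs hmem hcnt
    rcases List.pairwise_cons.1 hsfs with ⟨hflt, hsfs'⟩
    have hge : ∀ x ∈ L, f ≤ x := by
      intro x hx
      rcases List.mem_cons.1 (hmem x hx) with h | h
      · omega
      · exact le_of_lt (hflt x h)
    obtain ⟨L', hLeq, hfnot, hsL', hsub⟩ := pvSplit f L hsL hge
    have hcf : PySem.List.pyGetD buckets f 0 = (L.count f : Int) := hcnt f List.mem_cons_self
    set c : Nat := L.count f with hc
    simp only [pvScan, hcf]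
    by_cases hle : need ≤ (c : Int)
    · -- take = need, need' = 0: break, return ans + need * f
      rw [min_eq_right hle, if_pos (by ring)]
      have htake : L.take need.toNat = List.replicate need.toNat f := by
        rw [hLeq, List.take_append, List.take_replicate, List.length_replicate,
            min_eq_left (by omega), Nat.sub_eq_zero_of_le (by omega), List.take_zero,
            List.append_nil]
      rw [htake, List.sum_replicate, nsmul_eq_mul, Int.toNat_of_nonneg (by omega)]
    · -- take = c < need: recurse on the remaining bucket values with the rest of L
      rw [not_le] at hle
      rw [min_eq_left (by omega), if_neg (by omega)]
      have hcnt' : ∀ g ∈ fs, PySem.List.pyGetD buckets g 0 = (L'.count g : Int) := by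
        intro g hg
        have hfg : f < g := hflt g hg
        rw [hcnt g (List.mem_cons_of_mem _ hg), hLeq, List.count_append]
        simp [List.count_replicate]
        omega
      have hmem' : ∀ x ∈ L', x ∈ fs := by
        intro x hx
        rcases List.mem_cons.1 (hmem x (hsub x hx)) with h | h
        · exact absurd (h ▸ hx) hfnot
        · exact h
      rw [ih L' buckets _ _ (by omega) hsL' hsfs' hmem' hcnt']
      have hdrop : L.take need.toNat = List.replicate c f ++ L'.take (need - c).toNat := by
        rw [hLeq, List.take_append, List.length_replicate,
            List.take_of_length_le (by simp only [List.length_replicate]; omega)]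
        congr 2
        omega
      rw [hdrop, List.sum_append, List.sum_replicate, nsmul_eq_mul]
      ring

theorem minDeletion_eq_alt (s : String) (k : Int) :
    minDeletion s k = minDeletion_alt s k := by
  simp only [minDeletion, minDeletion_alt]
  rw [← PySem.Dict.counter_eq_foldl, PySem.Dict.foldl_insert_getD_add_one_eq_counter]
  set c := PySem.Dict.counter s.toList with hc
  set n := s.toList.length with hn
  have hvals : c.values = (PySem.Set.ofList s.toList).map (fun k => (s.toList.count k : Int)) := by
    simp only [hc, PySem.Dict.values, PySem.Dict.items_counter, List.map_map]; rfl
  have hbound : ∀ v ∈ c.values, 1 ≤ v ∧ v ≤ (n : Int) := by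
    intro v hv
    rw [hvals] at hv
    obtain ⟨x, hx, rfl⟩ := List.mem_map.1 hv
    have hxmem : x ∈ s.toList := (PySem.Set.mem_ofList _ _).1 hx
    have h1 : 1 ≤ s.toList.count x := List.count_pos_iff.2 hxmem
    have h2 : s.toList.count x ≤ n := List.count_le_length
    omega
  by_cases hk : (c.size : Int) ≤ k
  · rw [if_pos hk, if_pos (by omega)]
  · rw [if_neg hk, if_neg (by omega)]
    set L := PySem.List.sorted c.values (fun x => x) false with hL
    have hperm := PySem.List.sorted_perm c.values (fun x : Int => x) false
    have hcntL : ∀ f : Int, L.count f = c.values.count f := fun f => hperm.count_eq f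
    rw [pvScan_spec _ L _ 0 ((c.size : Int) - k) (by omega)
      (PySem.List.sorted_pairwise c.values (fun x : Int => x))
      (PySem.List.pairwise_lt_pyRange_one 1 ((n : Int) + 1))
      (by
        intro x hx
        have hxv : x ∈ c.values := (PySem.List.mem_sorted _ _ _ _).1 hx
        have := hbound x hxv
        exact PySem.List.mem_pyRange_one.2 (by omega))
      (by
        intro f hf
        have hfr := PySem.List.mem_pyRange_one.1 hf
        have hrep : ((List.replicate (n + 1) (0 : Int)).length : Int) = (n : Int) + 1 := by simp
        rw [pvBucket_getD c.values _
          (fun v hv => by rw [hrep]; have := hbound v hv; omega)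
          f (by omega) (by rw [hrep]; omega)]
        rw [PySem.List.pyGetD_eq_getElem _ _ (by omega) (by simp; omega)]
        simp only [List.getElem_replicate, zero_add]
        rw [hcntL f])]
    simp

-- ===== VERDICT (by name: the statement is the Claim_ definition above) =====
theorem minDeletion_spec : Claim_equal_minDeletion := by
  intro s k _
  exact minDeletion_eq_alt s k
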